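-- pv_equiv track=rewrite | github.com/chloeeekim/TIL | Algorithm/Programmers/Python/388353.py | solution
-- ===== SOURCE A (Python) =====
-- def solution(storage, requests):
--     n, m = len(storage) + 2, len(storage[0]) + 2
--     arr = [['0'] * m for _ in range(n)]
--     for i in range(n-2):
--         for j in range(m-2):
--             arr[i+1][j+1] = storage[i][j]
--     remain = (n-2) * (m-2)
--     nears = [[-1, 0], [1, 0], [0, -1], [0, 1]]
--
--     def get_access():
--         can_access = [[False] * m for _ in range(n)]
--         can_access[0][0] = True
--         queue = [(0, 0)]
--
--         while queue:
--             q = queue.pop(0)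
--             for near in nears:
--                 ni, nj = q[0] + near[0], q[1] + near[1]
--                 if ni < 0 or ni > n - 1 or nj < 0 or nj > m - 1:
--                     continue
--                 if arr[ni][nj] == '0' and can_access[ni][nj] == False:
--                     can_access[ni][nj] = True
--                     queue.append((ni, nj))
--         return can_access
--
--     def remove(request, access):
--         count = 0
--         can_access = get_access()
--         for i in range(1, n-1):
--             for j in range(1, m-1):
--                 if arr[i][j] == request:
--                     if access == True:
--                         if any(can_access[i+near[0]][j+near[1]] for near in nears):
--                             count += 1
--                             arr[i][j] = '0'
--                     else:
--                         count += 1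
--                         arr[i][j] = '0'
--         return count
--
--     for request in requests:
--         remain -= remove(request[0], True if len(request) == 1 else False)
--
--     return remain
-- ===== SOURCE B (Python) =====
-- def solution(storage, requests):
--     n, m = len(storage) + 2, len(storage[0]) + 2
--     grid = [['0'] * m for _ in range(n)]
--     for i in range(n - 2):
--         for j in range(m - 2):
--             grid[i + 1][j + 1] = storage[i][j]
--     acc = [[False] * m for _ in range(n)]
--
--     def expand(seeds):
--         stack = list(seeds)
--         while stack:
--             i, j = stack.pop()
--             if grid[i][j] == '0' and not acc[i][j]:
--                 acc[i][j] = True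
--                 if i > 0:
--                     stack.append((i - 1, j))
--                 if i < n - 1:
--                     stack.append((i + 1, j))
--                 if j > 0:
--                     stack.append((i, j - 1))
--                 if j < m - 1:
--                     stack.append((i, j + 1))
--
--     expand([(0, 0)])
--     remain = (n - 2) * (m - 2)
--     for request in requests:
--         target, need_access = request[0], len(request) == 1
--         removed = [(i, j) for i in range(1, n - 1) for j in range(1, m - 1)
--                    if grid[i][j] == target
--                    and (not need_access
--                         or acc[i - 1][j] or acc[i + 1][j] or acc[i][j - 1] or acc[i][j + 1])]
--         for i, j in removed:
--             grid[i][j] = '0'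
--         expand([(i, j) for (i, j) in removed
--                 if acc[i - 1][j] or acc[i + 1][j] or acc[i][j - 1] or acc[i][j + 1]])
--         remain -= len(removed)
--     return remain
-- ===== Notes on version B (the rewrite author's own statement) =====
-- stated objective: faster
-- what changed: B maintains the outside-accessible region incrementally (one boolean matrix expanded by DFS only from cells removed next to the accessible region) instead of A's full BFS recomputation with list.pop(0) before every request, and collects the removed cells of a request in one pure pass instead of counting while mutating.
import Mathlib
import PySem

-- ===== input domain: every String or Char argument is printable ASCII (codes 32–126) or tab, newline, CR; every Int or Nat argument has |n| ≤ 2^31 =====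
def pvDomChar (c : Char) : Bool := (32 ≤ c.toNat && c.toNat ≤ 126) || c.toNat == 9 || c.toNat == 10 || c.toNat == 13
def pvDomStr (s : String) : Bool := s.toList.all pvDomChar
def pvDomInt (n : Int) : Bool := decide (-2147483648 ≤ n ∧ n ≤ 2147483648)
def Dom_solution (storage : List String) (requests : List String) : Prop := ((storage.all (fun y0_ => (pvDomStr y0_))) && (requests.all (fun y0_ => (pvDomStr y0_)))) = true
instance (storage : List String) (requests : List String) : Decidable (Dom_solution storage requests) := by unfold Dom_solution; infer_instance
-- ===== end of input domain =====

-- B replaces A's per-request BFS recomputation (with list.pop(0)) by an incrementally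
-- maintained accessibility matrix that is only expanded from newly removed cells: faster.
-- Equivalence is about the RETURN value only (the Pythons mutate only function-local state).

-- 2-D matrix read/write helpers shared by both ports (arr[i][j] / arr[i][j] = v, indices known in range)
def mget {α : Type} (d : α) (g : List (List α)) (i j : Int) : α :=
  (g.getD i.toNat []).getD j.toNat d

def mset {α : Type} (g : List (List α)) (i j : Int) (v : α) : List (List α) :=
  g.set i.toNat ((g.getD i.toNat []).set j.toNat v)

-- the bordered grid both Pythons build with the same two loops
def pvBuild (storage : List String) (n m : Int) : List (List Char) :=
  (PySem.List.pyRange 0 (n-2) 1).foldl (fun a i =>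
    (PySem.List.pyRange 0 (m-2) 1).foldl (fun a j =>
      mset a (i+1) (j+1) ((PySem.Str.pyGet? (storage.getD i.toNat "") j).getD '0')) a)
    (List.replicate n.toNat (List.replicate m.toNat '0'))

-- ===== PORT A =====
def nearsA : List (Int × Int) := [(-1, 0), (1, 0), (0, -1), (0, 1)]

def bfsStepA (n m : Int) (arr : List (List Char)) (q : Int × Int)
    (st : List (Int × Int) × List (List Bool)) : List (Int × Int) × List (List Bool) :=
  nearsA.foldl (fun st near =>
    let ni := q.1 + near.1
    let nj := q.2 + near.2
    if ni < 0 ∨ ni > n - 1 ∨ nj < 0 ∨ nj > m - 1 then st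
    else if mget '0' arr ni nj = '0' ∧ mget false st.2 ni nj = false then
      (st.1 ++ [(ni, nj)], mset st.2 ni nj true)
    else st) st

-- the `while queue:` loop (fuel makes it total; 5*n*m+1 steps always suffice, proved below)
def bfsA (n m : Int) (arr : List (List Char)) :
    Nat → List (Int × Int) → List (List Bool) → List (List Bool)
  | 0, _, acc => acc
  | _ + 1, [], acc => acc
  | f + 1, q :: qs, acc =>
    let st := bfsStepA n m arr q (qs, acc)
    bfsA n m arr f st.1 st.2

def getAccessA (n m : Int) (arr : List (List Char)) : List (List Bool) :=
  bfsA n m arr (5 * (n.toNat * m.toNat) + 1) [(0, 0)]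
    (mset (List.replicate n.toNat (List.replicate m.toNat false)) 0 0 true)

def removeA (n m : Int) (arr : List (List Char)) (request : Char) (access : Bool) :
    Int × List (List Char) :=
  let can := getAccessA n m arr
  (PySem.List.pyRange 1 (n-1) 1).foldl (fun st i =>
    (PySem.List.pyRange 1 (m-1) 1).foldl (fun st j =>
      if mget '0' st.2 i j = request then
        if access = true then
          if nearsA.any (fun near => mget false can (i + near.1) (j + near.2)) then
            (st.1 + 1, mset st.2 i j '0')
          else st
        else (st.1 + 1, mset st.2 i j '0')
      else st) st) (0, arr)

def solution (storage : List String) (requests : List String) : Int :=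
  let n : Int := PySem.List.len storage + 2
  let m : Int := PySem.Str.len ((PySem.List.pyGet? storage 0).getD "") + 2
  let arr := pvBuild storage n m
  let fin := requests.foldl (fun (st : Int × List (List Char)) request =>
      let res := removeA n m st.2 ((PySem.Str.pyGet? request 0).getD '0')
        (if PySem.Str.len request = 1 then true else false)
      (st.1 - res.1, res.2))
    ((n - 2) * (m - 2), arr)
  fin.1

-- ===== PORT B =====
-- one iteration of expand's `while stack:` body (stack top at the HEAD of the list)
def expandStepB (n m : Int) (grid : List (List Char)) (c : Int × Int)
    (stack : List (Int × Int)) (acc : List (List Bool)) :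
    List (Int × Int) × List (List Bool) :=
  if mget '0' grid c.1 c.2 = '0' ∧ mget false acc c.1 c.2 = false then
    let acc := mset acc c.1 c.2 true
    let stack := if 0 < c.1 then (c.1 - 1, c.2) :: stack else stack
    let stack := if c.1 < n - 1 then (c.1 + 1, c.2) :: stack else stack
    let stack := if 0 < c.2 then (c.1, c.2 - 1) :: stack else stack
    let stack := if c.2 < m - 1 then (c.1, c.2 + 1) :: stack else stack
    (stack, acc)
  else (stack, acc)

def expandB (n m : Int) (grid : List (List Char)) :
    Nat → List (Int × Int) → List (List Bool) → List (List Bool)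
  | 0, _, acc => acc
  | _ + 1, [], acc => acc
  | f + 1, c :: stack, acc =>
    let st := expandStepB n m grid c stack acc
    expandB n m grid f st.1 st.2

-- `expand(seeds)`: the stack initially holds the seeds (Python pops the LAST element first,
-- so with the top at the head the initial stack is seeds.reverse); fuel always suffices (proved below)
def expandCall (n m : Int) (grid : List (List Char)) (seeds : List (Int × Int))
    (acc : List (List Bool)) : List (List Bool) :=
  expandB n m grid (5 * (n.toNat * m.toNat) + seeds.length + 1) seeds.reverse acc

def interiorB (n m : Int) : List (Int × Int) :=
  (PySem.List.pyRange 1 (n-1) 1).flatMap (fun i =>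
    (PySem.List.pyRange 1 (m-1) 1).map (fun j => (i, j)))

def accNbrB (acc : List (List Bool)) (c : Int × Int) : Bool :=
  mget false acc (c.1 - 1) c.2 || mget false acc (c.1 + 1) c.2 ||
  mget false acc c.1 (c.2 - 1) || mget false acc c.1 (c.2 + 1)

def solution_alt (storage : List String) (requests : List String) : Int :=
  let n : Int := PySem.List.len storage + 2
  let m : Int := PySem.Str.len ((PySem.List.pyGet? storage 0).getD "") + 2
  let grid0 := pvBuild storage n m
  let acc0 := expandCall n m grid0 [(0, 0)]
    (List.replicate n.toNat (List.replicate m.toNat false))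
  let fin := requests.foldl
    (fun (st : Int × List (List Char) × List (List Bool)) request =>
      let target := (PySem.Str.pyGet? request 0).getD '0'
      let needAccess := PySem.Str.len request = 1
      let grid := st.2.1
      let acc := st.2.2
      let removed := (interiorB n m).filter (fun c =>
        mget '0' grid c.1 c.2 = target ∧ (¬ needAccess ∨ accNbrB acc c = true))
      let grid' := removed.foldl (fun g c => mset g c.1 c.2 '0') grid
      let acc' := expandCall n m grid' (removed.filter (fun c => accNbrB acc c)) acc
      (st.1 - removed.length, grid', acc'))
    ((n - 2) * (m - 2), grid0, acc0)
  fin.1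

-- ===== PRECONDITION & SPEC =====
-- Pre_ excludes exactly the inputs where Python A raises: empty storage (storage[0]),
-- a row shorter than the first row (storage[i][j]), or an empty request string (request[0]).
def Pre_solution (storage : List String) (requests : List String) : Prop :=
  storage ≠ [] ∧
  (∀ row ∈ storage, PySem.Str.len (storage.getD 0 "") ≤ PySem.Str.len row) ∧
  (∀ r ∈ requests, r ≠ "")

instance (storage : List String) (requests : List String) : Decidable (Pre_solution storage requests) := by
  unfold Pre_solution; infer_instance

def pvWitness_solution : List String × List String := (["a0", "0b"], ["a", "bb"])

def Spec_solution (storage : List String) (requests : List String) (out : Int) : Prop := out = solution_alt storage requests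
instance (storage : List String) (requests : List String) (out : Int) : Decidable (Spec_solution storage requests out) := by unfold Spec_solution; infer_instance

-- ===== CLAIM (what is proved, stated in full; the proofs are below) =====
def Claim_equal_solution : Prop := ∀ (storage : List String) (requests : List String), Dom_solution storage requests → Pre_solution storage requests → Spec_solution storage requests (solution storage requests)

-- ===== LEMMAS AND PROOFS =====
-- ---------- proof-side notions ----------
def InR (n m : Int) (c : Int × Int) : Prop := 0 ≤ c.1 ∧ c.1 < n ∧ 0 ≤ c.2 ∧ c.2 < m

def Adj (c d : Int × Int) : Prop :=
  d = (c.1 - 1, c.2) ∨ d = (c.1 + 1, c.2) ∨ d = (c.1, c.2 - 1) ∨ d = (c.1, c.2 + 1)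

def Op (n m : Int) (g : List (List Char)) (c : Int × Int) : Prop :=
  InR n m c ∧ mget '0' g c.1 c.2 = '0'

def StepR (n m : Int) (g : List (List Char)) (c d : Int × Int) : Prop :=
  Op n m g c ∧ Op n m g d ∧ Adj c d

def Reach (n m : Int) (g : List (List Char)) (c : Int × Int) : Prop :=
  Op n m g c ∧ Relation.ReflTransGen (StepR n m g) (0, 0) c

def Shp {α : Type} (n m : Int) (g : List (List α)) : Prop :=
  g.length = n.toNat ∧ ∀ r ∈ g, r.length = m.toNat

theorem adj_symm {c d : Int × Int} (h : Adj c d) : Adj d c := by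
  obtain ⟨i, j⟩ := c; obtain ⟨i', j'⟩ := d
  rcases h with h | h | h | h <;> simp_all [Adj, Prod.ext_iff]

-- ---------- mget/mset basics ----------
theorem row_len {α : Type} {n m : Int} {g : List (List α)} (h : Shp n m g) {k : Nat}
    (hk : k < g.length) : (g[k]?.getD []).length = m.toNat := by
  rw [List.getElem?_eq_getElem hk]; exact h.2 _ (List.getElem_mem _)

theorem shp_mset {α : Type} {n m : Int} {g : List (List α)} (h : Shp n m g)
    {i j : Int} (hc : InR n m (i, j)) (v : α) : Shp n m (mset g i j v) := by
  obtain ⟨h1, h2⟩ := h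
  refine ⟨by simpa [mset] using h1, ?_⟩
  intro r hr
  rcases List.mem_or_eq_of_mem_set hr with hr | rfl
  · exact h2 _ hr
  · rw [List.length_set]
    have hi : i.toNat < g.length := by obtain ⟨a, b, c, d⟩ := hc; omega
    rw [List.getD_eq_getElem?_getD]
    exact row_len ⟨h1, h2⟩ hi

theorem mget_mset_self {α : Type} {n m : Int} {g : List (List α)} (h : Shp n m g)
    {i j : Int} (hc : InR n m (i, j)) (d v : α) :
    mget d (mset g i j v) i j = v := by
  obtain ⟨hi0, hin, hj0, hjm⟩ := hc
  have hi : i.toNat < g.length := by rw [h.1]; omega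
  have hj : j.toNat < (g[i.toNat]?.getD []).length := by rw [row_len h hi]; omega
  simp only [mget, mset, List.getD_eq_getElem?_getD]
  rw [List.getElem?_set_self hi]
  simp only [Option.getD_some]
  rw [List.getElem?_set_self hj]
  rfl

theorem mget_mset_ne {α : Type} {n m : Int} {g : List (List α)} (h : Shp n m g)
    {i j i' j' : Int} (hc : InR n m (i, j)) (hi2 : 0 ≤ i') (hj2 : 0 ≤ j')
    (hne : (i, j) ≠ (i', j')) (d v : α) :
    mget d (mset g i j v) i' j' = mget d g i' j' := by
  obtain ⟨hi0, hin, hj0, hjm⟩ := hc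
  simp only [mget, mset, List.getD_eq_getElem?_getD]
  by_cases hrow : i.toNat = i'.toNat
  · have hii : i = i' := by omega
    subst hii
    have hj' : j ≠ j' := fun hjj => hne (by rw [hjj])
    have hi : i.toNat < g.length := by rw [h.1]; omega
    rw [List.getElem?_set_self hi]
    simp only [Option.getD_some]
    rw [List.getElem?_set_ne (by omega)]
  · rw [List.getElem?_set_ne hrow]

theorem mget_replicate {α : Type} {n m : Int} {i j : Int} (h : InR n m (i, j)) (d v : α) :
    mget d (List.replicate n.toNat (List.replicate m.toNat v)) i j = v := by
  obtain ⟨hi0, hin, hj0, hjm⟩ := h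
  simp only [mget]
  rw [List.getD_replicate _ (by omega), List.getD_replicate _ (by omega)]

theorem shp_replicate {α : Type} (n m : Int) (v : α) :
    Shp n m (List.replicate n.toNat (List.replicate m.toNat v)) := by
  refine ⟨by simp, ?_⟩
  intro r hr; simp [List.eq_of_mem_replicate hr]

-- ---------- cell enumeration and the BFS measure ----------
def allCells (n m : Int) : List (Int × Int) :=
  (PySem.List.pyRange 0 n 1).flatMap (fun i =>
    (PySem.List.pyRange 0 m 1).map (fun j => (i, j)))

theorem allCells_eq_product (n m : Int) :
    allCells n m = PySem.List.pyRange 0 n 1 ×ˢ PySem.List.pyRange 0 m 1 := rfl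

theorem mem_allCells {n m : Int} {c : Int × Int} : c ∈ allCells n m ↔ InR n m c := by
  obtain ⟨i, j⟩ := c
  rw [allCells_eq_product, List.mem_product, PySem.List.mem_pyRange_one,
    PySem.List.mem_pyRange_one]
  unfold InR; omega

theorem nodup_allCells (n m : Int) : (allCells n m).Nodup := by
  rw [allCells_eq_product]
  exact (PySem.List.nodup_pyRange_one _ _).product (PySem.List.nodup_pyRange_one _ _)

theorem length_allCells (n m : Int) : (allCells n m).length = n.toNat * m.toNat := by
  rw [allCells_eq_product, List.length_product, PySem.List.length_pyRange_one,
    PySem.List.length_pyRange_one]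
  congr 1 <;> omega

def ucount (n m : Int) (M : List (List Bool)) : Nat :=
  ((allCells n m).filter (fun c => mget false M c.1 c.2 = false)).length

theorem ucount_le (n m : Int) (M : List (List Bool)) : ucount n m M ≤ n.toNat * m.toNat := by
  rw [← length_allCells n m]; exact List.length_filter_le _ _

theorem filter_length_lt_of_mem {γ : Type} {l : List γ} {p q : γ → Bool}
    {c : γ} (hnd : l.Nodup) (hc : c ∈ l)
    (hpc : p c = true) (hqc : q c = false) (hag : ∀ x ∈ l, x ≠ c → q x = p x) :
    (l.filter q).length < (l.filter p).length := by
  induction l with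
  | nil => cases hc
  | cons a t ih =>
    have hnd' := hnd.of_cons
    have hanot : a ∉ t := (List.nodup_cons.mp hnd).1
    by_cases hac : a = c
    · subst hac
      have heq : t.filter q = t.filter p := by
        apply List.filter_congr
        intro x hx
        exact hag x (List.mem_cons_of_mem _ hx) (fun h => hanot (h ▸ hx))
      simp only [List.filter_cons, hpc, hqc]
      rw [heq]
      simp
    · have hct : c ∈ t := by
        rcases List.mem_cons.mp hc with h | h
        · exact absurd h.symm hac
        · exact h
      have hih := ih hnd' hct (fun x hx hxc => hag x (List.mem_cons_of_mem _ hx) hxc)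
      have ha := hag a List.mem_cons_self hac
      simp only [List.filter_cons, ha]
      by_cases hpa : p a = true <;> simp [hpa] <;> omega

theorem ucount_mset_lt {n m : Int} {M : List (List Bool)} (hs : Shp n m M)
    {c : Int × Int} (hc : InR n m c) (hm : mget false M c.1 c.2 = false) :
    ucount n m (mset M c.1 c.2 true) < ucount n m M := by
  obtain ⟨ci, cj⟩ := c
  apply filter_length_lt_of_mem (nodup_allCells n m) (mem_allCells.mpr hc)
  · simpa using hm
  · simp only [decide_eq_false_iff_not]
    intro hfalse
    rw [mget_mset_self hs hc false true] at hfalse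
    cases hfalse
  · intro x hx hxc
    obtain ⟨xi, xj⟩ := x
    have hx' := mem_allCells.mp hx
    have := mget_mset_ne (i := ci) (j := cj) hs hc hx'.1 hx'.2.2.1
      (fun h => hxc h.symm) false true
    simp [this]

-- ---------- neighbour offsets and Adj ----------
theorem adj_of_near {c near : Int × Int} (h : near ∈ nearsA) :
    Adj c (c.1 + near.1, c.2 + near.2) := by
  simp only [nearsA, List.mem_cons, List.not_mem_nil, or_false] at h
  rcases h with rfl | rfl | rfl | rfl <;> simp [Adj, Prod.ext_iff] <;> omega

theorem adj_cases {c d : Int × Int} (h : Adj c d) :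
    ∃ near ∈ nearsA, d = (c.1 + near.1, c.2 + near.2) := by
  rcases h with rfl | rfl | rfl | rfl
  · exact ⟨(-1, 0), by simp [nearsA], by simp [Prod.ext_iff]; omega⟩
  · exact ⟨(1, 0), by simp [nearsA], by simp⟩
  · exact ⟨(0, -1), by simp [nearsA], by simp [Prod.ext_iff]; omega⟩
  · exact ⟨(0, 1), by simp [nearsA], by simp⟩

-- ---------- zeroing a list of cells ----------
def zeroAll (g : List (List Char)) (D : List (Int × Int)) : List (List Char) :=
  D.foldl (fun g c => mset g c.1 c.2 '0') g

theorem shp_zeroAll {n m : Int} {D : List (Int × Int)} (hD : ∀ x ∈ D, InR n m x) :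
    ∀ {g : List (List Char)}, Shp n m g → Shp n m (zeroAll g D) := by
  induction D with
  | nil => intro g hs; exact hs
  | cons d t ih =>
    intro g hs
    have hd := hD d List.mem_cons_self
    exact ih (fun x hx => hD x (List.mem_cons_of_mem _ hx))
      (by obtain ⟨di, dj⟩ := d; exact shp_mset hs hd '0')

theorem mget_zeroAll_of_not_mem {n m : Int} {D : List (Int × Int)}
    (hD : ∀ x ∈ D, InR n m x) {c : Int × Int} (hc1 : 0 ≤ c.1) (hc2 : 0 ≤ c.2)
    (hnm : c ∉ D) : ∀ {g : List (List Char)}, Shp n m g →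
    mget '0' (zeroAll g D) c.1 c.2 = mget '0' g c.1 c.2 := by
  induction D with
  | nil => intro g _; rfl
  | cons d t ih =>
    intro g hs
    have hd := hD d List.mem_cons_self
    have hdc : d ≠ c := fun h => hnm (h ▸ List.mem_cons_self)
    obtain ⟨di, dj⟩ := d
    obtain ⟨ci, cj⟩ := c
    have step : mget '0' (mset g di dj '0') ci cj = mget '0' g ci cj :=
      mget_mset_ne hs hd hc1 hc2 hdc '0' '0'
    rw [show zeroAll g ((di, dj) :: t) = zeroAll (mset g di dj '0') t from rfl,
      ih (fun x hx => hD x (List.mem_cons_of_mem _ hx))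
        (fun h => hnm (List.mem_cons_of_mem _ h)) (shp_mset hs hd '0'), step]

theorem mget_zeroAll_zero {n m : Int} {D : List (Int × Int)}
    (hD : ∀ x ∈ D, InR n m x) {c : Int × Int} (hc : InR n m c) :
    ∀ {g : List (List Char)}, Shp n m g → mget '0' g c.1 c.2 = '0' →
    mget '0' (zeroAll g D) c.1 c.2 = '0' := by
  induction D with
  | nil => intro g _ h; exact h
  | cons d t ih =>
    intro g hs h
    have hd := hD d List.mem_cons_self
    obtain ⟨di, dj⟩ := d
    obtain ⟨ci, cj⟩ := c
    rw [show zeroAll g ((di, dj) :: t) = zeroAll (mset g di dj '0') t from rfl]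
    apply ih (fun x hx => hD x (List.mem_cons_of_mem _ hx)) (shp_mset hs hd '0')
    by_cases hdc : ((di, dj) : Int × Int) = (ci, cj)
    · cases hdc; exact mget_mset_self hs hd '0' '0'
    · rw [mget_mset_ne hs hd hc.1 hc.2.2.1 hdc '0' '0']; exact h

theorem op_zeroAll_mono {n m : Int} {D : List (Int × Int)} {g : List (List Char)}
    (hD : ∀ x ∈ D, InR n m x) (hs : Shp n m g) {c : Int × Int} (h : Op n m g c) :
    Op n m (zeroAll g D) c :=
  ⟨h.1, mget_zeroAll_zero hD h.1 hs h.2⟩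

-- ---------- characterization of A's BFS ----------
def bfsBody (n m : Int) (arr : List (List Char)) (q : Int × Int)
    (st : List (Int × Int) × List (List Bool)) (near : Int × Int) :
    List (Int × Int) × List (List Bool) :=
  let ni := q.1 + near.1
  let nj := q.2 + near.2
  if ni < 0 ∨ ni > n - 1 ∨ nj < 0 ∨ nj > m - 1 then st
  else if mget '0' arr ni nj = '0' ∧ mget false st.2 ni nj = false then
    (st.1 ++ [(ni, nj)], mset st.2 ni nj true)
  else st

theorem bfsStepA_eq_foldl (n m : Int) (arr : List (List Char)) (q : Int × Int)
    (st : List (Int × Int) × List (List Bool)) :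
    bfsStepA n m arr q st = nearsA.foldl (bfsBody n m arr q) st := rfl

structure StInv (n m : Int) (arr : List (List Char))
    (st : List (Int × Int) × List (List Bool)) : Prop where
  shp : Shp n m st.2
  sound : ∀ c, InR n m c → mget false st.2 c.1 c.2 = true → Reach n m arr c
  queue : ∀ c ∈ st.1, InR n m c ∧ mget false st.2 c.1 c.2 = true

theorem bfsStep_fold (n m : Int) (arr : List (List Char)) {q : Int × Int}
    (hq : Reach n m arr q) :
    ∀ (ns : List (Int × Int)), (∀ x ∈ ns, x ∈ nearsA) →
    ∀ (qs : List (Int × Int)) (acc : List (List Bool)),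
    StInv n m arr (qs, acc) →
    (StInv n m arr (ns.foldl (bfsBody n m arr q) (qs, acc))) ∧
    (∀ c : Int × Int, 0 ≤ c.1 → 0 ≤ c.2 → mget false acc c.1 c.2 = true →
      mget false (ns.foldl (bfsBody n m arr q) (qs, acc)).2 c.1 c.2 = true) ∧
    (∀ x ∈ qs, x ∈ (ns.foldl (bfsBody n m arr q) (qs, acc)).1) ∧
    (5 * ucount n m (ns.foldl (bfsBody n m arr q) (qs, acc)).2 +
      (ns.foldl (bfsBody n m arr q) (qs, acc)).1.length ≤ 5 * ucount n m acc + qs.length) ∧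
    (∀ near ∈ ns, Op n m arr (q.1 + near.1, q.2 + near.2) →
      mget false (ns.foldl (bfsBody n m arr q) (qs, acc)).2 (q.1 + near.1) (q.2 + near.2) = true) ∧
    (∀ c, InR n m c → mget false (ns.foldl (bfsBody n m arr q) (qs, acc)).2 c.1 c.2 = true →
      mget false acc c.1 c.2 = true ∨ c ∈ (ns.foldl (bfsBody n m arr q) (qs, acc)).1) := by
  intro ns
  induction ns with
  | nil =>
    intro _ qs acc h
    refine ⟨h, fun c _ _ hm => hm, fun x hx => hx, le_refl _, by simp, fun c _ hm => Or.inl hm⟩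
  | cons near ns ih =>
    intro sub qs acc h
    have hnear : near ∈ nearsA := sub _ List.mem_cons_self
    have sub' : ∀ x ∈ ns, x ∈ nearsA := fun x hx => sub x (List.mem_cons_of_mem _ hx)
    set d : Int × Int := (q.1 + near.1, q.2 + near.2) with hd
    simp only [List.foldl_cons]
    by_cases hob : q.1 + near.1 < 0 ∨ q.1 + near.1 > n - 1 ∨ q.2 + near.2 < 0 ∨ q.2 + near.2 > m - 1
    · have hstep : bfsBody n m arr q (qs, acc) near = (qs, acc) := by
        simp only [bfsBody]; rw [if_pos hob]
      rw [hstep]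
      obtain ⟨h1, h2, h3, h4, h5, h6⟩ := ih sub' qs acc h
      refine ⟨h1, h2, h3, h4, ?_, h6⟩
      intro nr hnr hop
      rcases List.mem_cons.mp hnr with rfl | hnr
      · exact absurd hop (fun hop => by obtain ⟨a, b, c', e⟩ := hop.1; simp at a b c' e; omega)
      · exact h5 nr hnr hop
    · push Not at hob
      have hdIn : InR n m d := ⟨by simp [hd]; omega, by simp [hd]; omega, by simp [hd]; omega, by simp [hd]; omega⟩
      by_cases hg : mget '0' arr (q.1 + near.1) (q.2 + near.2) = '0' ∧
          mget false acc (q.1 + near.1) (q.2 + near.2) = false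
      · have hstep : bfsBody n m arr q (qs, acc) near =
            (qs ++ [d], mset acc d.1 d.2 true) := by
          simp only [bfsBody]; rw [if_neg (by push Not; exact hob), if_pos hg]
        rw [hstep]
        have hOpd : Op n m arr d := ⟨hdIn, hg.1⟩
        have hReachd : Reach n m arr d :=
          ⟨hOpd, hq.2.tail ⟨hq.1, hOpd, adj_of_near hnear⟩⟩
        have hshp' : Shp n m (mset acc d.1 d.2 true) := shp_mset h.shp hdIn true
        have hmon : ∀ c : Int × Int, 0 ≤ c.1 → 0 ≤ c.2 → mget false acc c.1 c.2 = true →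
            mget false (mset acc d.1 d.2 true) c.1 c.2 = true := by
          intro c hc1 hc2 hm
          by_cases hcd : (d.1, d.2) = (c.1, c.2)
          · have : d = c := by obtain ⟨a,b⟩ := d; obtain ⟨x,y⟩ := c; simpa [Prod.ext_iff] using hcd
            subst this
            exact mget_mset_self h.shp hdIn false true
          · rw [mget_mset_ne h.shp hdIn hc1 hc2 hcd false true]; exact hm
        have hdm : mget false (mset acc d.1 d.2 true) d.1 d.2 = true :=
          mget_mset_self h.shp hdIn false true
        have hInv' : StInv n m arr (qs ++ [d], mset acc d.1 d.2 true) := by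
          refine ⟨hshp', ?_, ?_⟩
          · intro c hc hm
            by_cases hcd : c = d
            · subst hcd; exact hReachd
            · have hne : (d.1, d.2) ≠ (c.1, c.2) := by
                intro hcon; apply hcd
                obtain ⟨a,b⟩ := d; obtain ⟨x,y⟩ := c; simpa [Prod.ext_iff] using hcon.symm
              rw [mget_mset_ne h.shp hdIn hc.1 hc.2.2.1 hne false true] at hm
              exact h.sound c hc hm
          · intro c hc
            rcases List.mem_append.mp hc with hc | hc
            · obtain ⟨hin, hm⟩ := h.queue c hc
              exact ⟨hin, hmon c hin.1 hin.2.2.1 hm⟩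
            · rcases List.mem_singleton.mp hc with rfl
              exact ⟨hdIn, hdm⟩
        obtain ⟨h1, h2, h3, h4, h5, h6⟩ := ih sub' (qs ++ [d]) (mset acc d.1 d.2 true) hInv'
        have hmeas : 5 * ucount n m (mset acc d.1 d.2 true) + (qs ++ [d]).length ≤
            5 * ucount n m acc + qs.length := by
          have := ucount_mset_lt (show Shp n m acc from h.shp) hdIn hg.2
          simp only [List.length_append, List.length_singleton]
          omega
        refine ⟨h1, ?_, ?_, le_trans h4 hmeas, ?_, ?_⟩
        · intro c hc1 hc2 hm; exact h2 c hc1 hc2 (hmon c hc1 hc2 hm)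
        · intro x hx; exact h3 x (List.mem_append_left _ hx)
        · intro nr hnr hop
          rcases List.mem_cons.mp hnr with rfl | hnr
          · exact h2 d hdIn.1 hdIn.2.2.1 hdm
          · exact h5 nr hnr hop
        · intro c hc hm
          rcases h6 c hc hm with hm' | hq'
          · by_cases hcd : c = d
            · subst hcd; exact Or.inr (h3 d (List.mem_append_right _ (by simp : d ∈ [d])))
            · have hne : (d.1, d.2) ≠ (c.1, c.2) := by
                intro hcon; apply hcd
                obtain ⟨a,b⟩ := d; obtain ⟨x,y⟩ := c; simpa [Prod.ext_iff] using hcon.symm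
              rw [mget_mset_ne h.shp hdIn hc.1 hc.2.2.1 hne false true] at hm'
              exact Or.inl hm'
          · exact Or.inr hq'
      · have hstep : bfsBody n m arr q (qs, acc) near = (qs, acc) := by
          simp only [bfsBody]; rw [if_neg (by push Not; exact hob), if_neg hg]
        rw [hstep]
        obtain ⟨h1, h2, h3, h4, h5, h6⟩ := ih sub' qs acc h
        refine ⟨h1, h2, h3, h4, ?_, h6⟩
        intro nr hnr hop
        rcases List.mem_cons.mp hnr with rfl | hnr
        · have hmk : mget false acc (q.1 + nr.1) (q.2 + nr.2) = true := by
            rcases Bool.eq_false_or_eq_true (mget false acc (q.1 + nr.1) (q.2 + nr.2)) with ht | hf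
            · exact ht
            · exact absurd ⟨hop.2, hf⟩ hg
          exact h2 _ hdIn.1 hdIn.2.2.1 hmk
        · exact h5 nr hnr hop

theorem bfsA_loop (n m : Int) (arr : List (List Char)) :
    ∀ (f : Nat) (q : List (Int × Int)) (acc : List (List Bool)),
    StInv n m arr (q, acc) →
    (∀ c, InR n m c → mget false acc c.1 c.2 = true →
      c ∈ q ∨ ∀ d, Adj c d → Op n m arr d → mget false acc d.1 d.2 = true) →
    mget false acc 0 0 = true →
    5 * ucount n m acc + q.length < f →
    ∀ c, InR n m c →
      (mget false (bfsA n m arr f q acc) c.1 c.2 = true ↔ Reach n m arr c) := by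
  intro f
  induction f with
  | zero => intro q acc _ _ _ hf; omega
  | succ f ih =>
    intro q acc hInv hFront hRoot hf c hc
    cases q with
    | nil =>
      rw [show bfsA n m arr (f+1) [] acc = acc from rfl]
      constructor
      · exact hInv.sound c hc
      · rintro ⟨hOp, hrtg⟩
        have key : ∀ x, Relation.ReflTransGen (StepR n m arr) (0,0) x →
            Op n m arr x → mget false acc x.1 x.2 = true := by
          intro x hx
          induction hx with
          | refl => intro _; exact hRoot
          | tail hab hbc ihx =>
            intro hOpc
            have hb := ihx hbc.1
            rcases hFront _ hbc.1.1 hb with hq | hcl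
            · cases hq
            · exact hcl _ hbc.2.2 hbc.2.1
        exact key c hrtg hOp
    | cons q0 qs =>
      obtain ⟨hq0In, hq0M⟩ := hInv.queue q0 List.mem_cons_self
      have hq0R : Reach n m arr q0 := hInv.sound q0 hq0In hq0M
      obtain ⟨h1, h2, h3, h4, h5, h6⟩ := bfsStep_fold n m arr hq0R nearsA
        (fun x hx => hx) qs acc
        ⟨hInv.shp, hInv.sound, fun x hx => hInv.queue x (List.mem_cons_of_mem _ hx)⟩
      have hbfs : bfsA n m arr (f+1) (q0::qs) acc =
          bfsA n m arr f (nearsA.foldl (bfsBody n m arr q0) (qs, acc)).1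
            (nearsA.foldl (bfsBody n m arr q0) (qs, acc)).2 := by
        rw [show bfsA n m arr (f+1) (q0::qs) acc =
          bfsA n m arr f (bfsStepA n m arr q0 (qs, acc)).1 (bfsStepA n m arr q0 (qs, acc)).2 from rfl,
          bfsStepA_eq_foldl]
      rw [hbfs]
      generalize hst : nearsA.foldl (bfsBody n m arr q0) (qs, acc) = st at h1 h2 h3 h4 h5 h6 ⊢
      apply ih _ _ h1 ?front ?root ?meas c hc
      case front =>
        intro c' hc' hm'
        rcases h6 c' hc' hm' with hold | hq'
        · rcases hFront c' hc' hold with hq' | hcl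
          · rcases List.mem_cons.mp hq' with rfl | hq'
            · right; intro d hAdj hOpd
              obtain ⟨near, hnear, rfl⟩ := adj_cases hAdj
              exact h5 near hnear hOpd
            · exact Or.inl (h3 _ hq')
          · right; intro d hAdj hOpd
            exact h2 d hOpd.1.1 hOpd.1.2.2.1 (hcl d hAdj hOpd)
        · exact Or.inl hq'
      case root => exact h2 (0,0) (le_refl 0) (le_refl 0) hRoot
      case meas =>
        simp only [List.length_cons] at hf
        omega

theorem getAccessA_char {n m : Int} {arr : List (List Char)} (_hs : Shp n m arr)
    (hb : mget '0' arr 0 0 = '0') (hn : 0 < n) (hm : 0 < m) :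
    ∀ c, InR n m c →
    (mget false (getAccessA n m arr) c.1 c.2 = true ↔ Reach n m arr c) := by
  intro c hc
  have h00 : InR n m ((0,0) : Int × Int) := ⟨le_refl 0, hn, le_refl 0, hm⟩
  have hshp0 : Shp n m (List.replicate n.toNat (List.replicate m.toNat false)) :=
    shp_replicate n m false
  have hshp : Shp n m (mset (List.replicate n.toNat (List.replicate m.toNat false)) 0 0 true) :=
    shp_mset (i := 0) (j := 0) hshp0 h00 true
  have hroot : mget false (mset (List.replicate n.toNat (List.replicate m.toNat false)) 0 0 true) 0 0 = true :=
    mget_mset_self (i := 0) (j := 0) hshp0 h00 false true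
  have hmark : ∀ x : Int × Int, InR n m x →
      mget false (mset (List.replicate n.toNat (List.replicate m.toNat false)) 0 0 true) x.1 x.2 = true →
      x = ((0,0) : Int × Int) := by
    intro x hx hmx
    by_cases hx0 : x = ((0,0) : Int × Int)
    · exact hx0
    · exfalso
      have hne : ((0:Int), (0:Int)) ≠ (x.1, x.2) := by
        intro hcon; apply hx0
        obtain ⟨a,b⟩ := x; simp only [Prod.ext_iff] at hcon ⊢
        exact ⟨hcon.1.symm, hcon.2.symm⟩
      rw [mget_mset_ne (i := 0) (j := 0) hshp0 h00 hx.1 hx.2.2.1 hne false true,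
        mget_replicate hx false false] at hmx
      cases hmx
  have hReach0 : Reach n m arr ((0,0) : Int × Int) := ⟨⟨h00, hb⟩, Relation.ReflTransGen.refl⟩
  apply bfsA_loop n m arr _ _ _ ?inv ?front hroot ?meas c hc
  case inv =>
    refine ⟨hshp, ?_, ?_⟩
    · intro x hx hmx
      rw [hmark x hx hmx]; exact hReach0
    · intro x hx
      rcases List.mem_singleton.mp hx with rfl
      exact ⟨h00, hroot⟩
  case front =>
    intro x hx hmx
    left; rw [hmark x hx hmx]; exact List.mem_singleton_self _
  case meas =>
    have hlt : ucount n m (mset (List.replicate n.toNat (List.replicate m.toNat false)) 0 0 true)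
        < n.toNat * m.toNat := by
      rw [← length_allCells n m]
      apply List.length_filter_lt_length_iff_exists.mpr
      exact ⟨((0,0) : Int × Int), mem_allCells.mpr h00, by simp [hroot]⟩
    simp only [List.length_singleton]
    omega

-- ---------- characterization of B's expand ----------
def OpN (n m : Int) (g : List (List Char)) (acc0 : List (List Bool)) (c : Int × Int) : Prop :=
  Op n m g c ∧ mget false acc0 c.1 c.2 = false

def StepN (n m : Int) (g : List (List Char)) (acc0 : List (List Bool)) (c d : Int × Int) : Prop :=
  OpN n m g acc0 c ∧ OpN n m g acc0 d ∧ Adj c d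

def NR (n m : Int) (g : List (List Char)) (acc0 : List (List Bool))
    (seeds : List (Int × Int)) (c : Int × Int) : Prop :=
  ∃ s ∈ seeds, OpN n m g acc0 s ∧ Relation.ReflTransGen (StepN n m g acc0) s c

theorem rtg_last {γ : Type} {R : γ → γ → Prop} {P : γ → Prop}
    (hP : ∀ a b, R a b → P b) : ∀ {a b}, Relation.ReflTransGen R a b → P a → P b := by
  intro a b h
  induction h with
  | refl => exact id
  | tail _ hbc ih => intro ha; exact hP _ _ hbc

theorem nr_opN {n m : Int} {g : List (List Char)} {acc0 : List (List Bool)}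
    {seeds : List (Int × Int)} {c : Int × Int} (h : NR n m g acc0 seeds c) :
    OpN n m g acc0 c := by
  obtain ⟨s, _, hOp, hrtg⟩ := h
  exact rtg_last (fun a b hab => hab.2.1) hrtg hOp

theorem mem_expandStep_stack {n m : Int} {g : List (List Char)} {c0 : Int × Int}
    {stack : List (Int × Int)} {M : List (List Bool)}
    (hguard : mget '0' g c0.1 c0.2 = '0' ∧ mget false M c0.1 c0.2 = false) (x : Int × Int) :
    x ∈ (expandStepB n m g c0 stack M).1 ↔
      (x ∈ stack ∨ (0 < c0.1 ∧ x = (c0.1 - 1, c0.2)) ∨ (c0.1 < n - 1 ∧ x = (c0.1 + 1, c0.2)) ∨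
        (0 < c0.2 ∧ x = (c0.1, c0.2 - 1)) ∨ (c0.2 < m - 1 ∧ x = (c0.1, c0.2 + 1))) := by
  by_cases h1 : 0 < c0.1 <;> by_cases h2 : c0.1 < n - 1 <;>
    by_cases h3 : 0 < c0.2 <;> by_cases h4 : c0.2 < m - 1 <;>
    simp [expandStepB, if_pos hguard, h1, h2, h3, h4, List.mem_cons] <;> try tauto

theorem expandStep_snd_mark {n m : Int} {g : List (List Char)} {c0 : Int × Int}
    {stack : List (Int × Int)} {M : List (List Bool)}
    (hguard : mget '0' g c0.1 c0.2 = '0' ∧ mget false M c0.1 c0.2 = false) :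
    (expandStepB n m g c0 stack M).2 = mset M c0.1 c0.2 true := by
  simp only [expandStepB, if_pos hguard]

theorem expandStep_len {n m : Int} {g : List (List Char)} {c0 : Int × Int}
    {stack : List (Int × Int)} {M : List (List Bool)}
    (hguard : mget '0' g c0.1 c0.2 = '0' ∧ mget false M c0.1 c0.2 = false) :
    (expandStepB n m g c0 stack M).1.length ≤ stack.length + 4 := by
  simp only [expandStepB, if_pos hguard]
  split_ifs <;> simp

theorem expandStep_skip {n m : Int} {g : List (List Char)} {c0 : Int × Int}
    {stack : List (Int × Int)} {M : List (List Bool)}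
    (hguard : ¬ (mget '0' g c0.1 c0.2 = '0' ∧ mget false M c0.1 c0.2 = false)) :
    expandStepB n m g c0 stack M = (stack, M) := by
  simp only [expandStepB, if_neg hguard]

structure ExInv (n m : Int) (g : List (List Char)) (acc0 : List (List Bool))
    (seeds : List (Int × Int)) (st : List (Int × Int) × List (List Bool)) : Prop where
  shp : Shp n m st.2
  mono : ∀ c : Int × Int, 0 ≤ c.1 → 0 ≤ c.2 → mget false acc0 c.1 c.2 = true →
    mget false st.2 c.1 c.2 = true
  sound : ∀ c, InR n m c → mget false st.2 c.1 c.2 = true →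
    mget false acc0 c.1 c.2 = true ∨ NR n m g acc0 seeds c
  stack : ∀ d ∈ st.1, InR n m d ∧ (d ∈ seeds ∨ ∃ c, OpN n m g acc0 c ∧
    NR n m g acc0 seeds c ∧ mget false st.2 c.1 c.2 = true ∧ Adj c d)
  front : ∀ c, InR n m c → mget false st.2 c.1 c.2 = true → mget false acc0 c.1 c.2 = false →
    ∀ d, Adj c d → Op n m g d → (mget false st.2 d.1 d.2 = true ∨ d ∈ st.1)
  seedsP : ∀ s ∈ seeds, Op n m g s → (mget false st.2 s.1 s.2 = true ∨ s ∈ st.1)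

theorem expandB_loop {n m : Int} {g : List (List Char)} {acc0 : List (List Bool)}
    {seeds : List (Int × Int)} :
    ∀ (f : Nat) (stack : List (Int × Int)) (M : List (List Bool)),
    ExInv n m g acc0 seeds (stack, M) →
    5 * ucount n m M + stack.length < f →
    ∀ c, InR n m c →
      (mget false (expandB n m g f stack M) c.1 c.2 = true ↔
        (mget false acc0 c.1 c.2 = true ∨ NR n m g acc0 seeds c)) := by
  intro f
  induction f with
  | zero => intro stack M _ hf; omega
  | succ f ih =>
    intro stack M hInv hf c hc
    cases stack with
    | nil =>
      rw [show expandB n m g (f+1) [] M = M from rfl]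
      constructor
      · exact hInv.sound c hc
      · rintro (hacc | hnr)
        · exact hInv.mono c hc.1 hc.2.2.1 hacc
        · obtain ⟨s, hsm, hsOp, hrtg⟩ := hnr
          have hsM : mget false M s.1 s.2 = true := by
            rcases hInv.seedsP s hsm hsOp.1 with h | h
            · exact h
            · cases h
          have key : ∀ x y, Relation.ReflTransGen (StepN n m g acc0) x y →
              mget false M x.1 x.2 = true → mget false M y.1 y.2 = true := by
            intro x y hxy
            induction hxy with
            | refl => exact id
            | tail hab hbc ihx =>
              intro hx
              have hb := ihx hx
              rcases hInv.front _ hbc.1.1.1 hb hbc.1.2 _ hbc.2.2 hbc.2.1.1 with h | h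
              · exact h
              · cases h
          exact key s c hrtg hsM
    | cons c0 rest =>
      obtain ⟨hc0In, hc0W⟩ := hInv.stack c0 List.mem_cons_self
      have hexp : expandB n m g (f+1) (c0::rest) M =
          expandB n m g f (expandStepB n m g c0 rest M).1 (expandStepB n m g c0 rest M).2 := rfl
      rw [hexp]
      by_cases hguard : mget '0' g c0.1 c0.2 = '0' ∧ mget false M c0.1 c0.2 = false
      · have hOpc0 : Op n m g c0 := ⟨hc0In, hguard.1⟩
        have hacc0c0 : mget false acc0 c0.1 c0.2 = false := by
          rcases Bool.eq_false_or_eq_true (mget false acc0 c0.1 c0.2) with h | h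
          · exact absurd (hInv.mono c0 hc0In.1 hc0In.2.2.1 h) (by simp [hguard.2])
          · exact h
        have hOpN : OpN n m g acc0 c0 := ⟨hOpc0, hacc0c0⟩
        have hNR : NR n m g acc0 seeds c0 := by
          rcases hc0W with hseed | ⟨c', hOpc', hNRc', hMc', hAdj⟩
          · exact ⟨c0, hseed, hOpN, Relation.ReflTransGen.refl⟩
          · obtain ⟨s, hsm, hsOp, hrtg⟩ := hNRc'
            exact ⟨s, hsm, hsOp, hrtg.tail ⟨hOpc', hOpN, hAdj⟩⟩
        have hsnd := expandStep_snd_mark (n := n) (m := m) (stack := rest) hguard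
        have hmemS := fun x => mem_expandStep_stack (n := n) (m := m) (stack := rest) hguard x
        have hshp' : Shp n m (mset M c0.1 c0.2 true) := shp_mset hInv.shp hc0In true
        have hmark : mget false (mset M c0.1 c0.2 true) c0.1 c0.2 = true :=
          mget_mset_self hInv.shp hc0In false true
        have hmono1 : ∀ x : Int × Int, 0 ≤ x.1 → 0 ≤ x.2 →
            mget false M x.1 x.2 = true → mget false (mset M c0.1 c0.2 true) x.1 x.2 = true := by
          intro x hx1 hx2 hm
          by_cases hxc : (c0.1, c0.2) = (x.1, x.2)
          · have hcx : c0 = x := by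
              obtain ⟨a,b⟩ := c0; obtain ⟨u,v⟩ := x; simpa [Prod.ext_iff] using hxc
            subst hcx; exact hmark
          · rw [mget_mset_ne hInv.shp hc0In hx1 hx2 hxc false true]; exact hm
        have hget' : ∀ x : Int × Int, InR n m x → x ≠ c0 →
            mget false (mset M c0.1 c0.2 true) x.1 x.2 = mget false M x.1 x.2 := by
          intro x hx hxc
          have hne : (c0.1, c0.2) ≠ (x.1, x.2) := by
            intro hcon; apply hxc
            obtain ⟨a,b⟩ := c0; obtain ⟨u,v⟩ := x
            simp only [Prod.ext_iff] at hcon ⊢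
            exact ⟨hcon.1.symm, hcon.2.symm⟩
          exact mget_mset_ne hInv.shp hc0In hx.1 hx.2.2.1 hne false true
        have hInv' : ExInv n m g acc0 seeds
            ((expandStepB n m g c0 rest M).1, (expandStepB n m g c0 rest M).2) := by
          refine ⟨by rw [hsnd]; exact hshp', ?_, ?_, ?_, ?_, ?_⟩
          · intro x hx1 hx2 hm
            rw [hsnd]; exact hmono1 x hx1 hx2 (hInv.mono x hx1 hx2 hm)
          · intro x hx hm
            rw [hsnd] at hm
            by_cases hxc : x = c0
            · subst hxc; exact Or.inr hNR
            · rw [hget' x hx hxc] at hm; exact hInv.sound x hx hm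
          · intro d hd
            rw [hsnd]
            rcases (hmemS d).mp hd with hd | hd | hd | hd | hd
            · obtain ⟨hdIn, hdW⟩ := hInv.stack d (List.mem_cons_of_mem _ hd)
              refine ⟨hdIn, ?_⟩
              rcases hdW with h | ⟨c', h1, h2, h3, h4⟩
              · exact Or.inl h
              · exact Or.inr ⟨c', h1, h2, hmono1 c' h1.1.1.1 h1.1.1.2.2.1 h3, h4⟩
            all_goals {
              obtain ⟨hcond, rfl⟩ := hd
              obtain ⟨ha, hb, hcc, he⟩ := hc0In
              refine ⟨⟨by simp; omega, by simp; omega, by simp; omega, by simp; omega⟩, ?_⟩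
              exact Or.inr ⟨c0, hOpN, hNR, hmark, by simp [Adj, Prod.ext_iff]⟩
            }
          · intro x hx hm hacc d hAdj hOpd
            rw [hsnd] at hm ⊢
            by_cases hxc : x = c0
            · subst hxc
              right
              rw [hmemS d]
              obtain ⟨⟨ha, hb, hcc, he⟩, _⟩ := hOpd
              rcases hAdj with rfl | rfl | rfl | rfl
              · exact Or.inr (Or.inl ⟨by simp at ha hb hcc he ⊢; omega, rfl⟩)
              · exact Or.inr (Or.inr (Or.inl ⟨by simp at ha hb hcc he ⊢; omega, rfl⟩))
              · exact Or.inr (Or.inr (Or.inr (Or.inl ⟨by simp at ha hb hcc he ⊢; omega, rfl⟩)))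
              · exact Or.inr (Or.inr (Or.inr (Or.inr ⟨by simp at ha hb hcc he ⊢; omega, rfl⟩)))
            · rw [hget' x hx hxc] at hm
              rcases hInv.front x hx hm hacc d hAdj hOpd with h | h
              · exact Or.inl (hmono1 d hOpd.1.1 hOpd.1.2.2.1 h)
              · by_cases hdc : d = c0
                · subst hdc; exact Or.inl hmark
                · right
                  rw [hmemS d]
                  refine Or.inl ?_
                  rcases List.mem_cons.mp h with h' | h'
                  · exact absurd h' hdc
                  · exact h'
          · intro s hsm hsOp
            rw [hsnd]
            rcases hInv.seedsP s hsm hsOp with h | h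
            · exact Or.inl (hmono1 s hsOp.1.1 hsOp.1.2.2.1 h)
            · by_cases hsc : s = c0
              · subst hsc; exact Or.inl hmark
              · right
                rw [hmemS s]
                refine Or.inl ?_
                rcases List.mem_cons.mp h with h' | h'
                · exact absurd h' hsc
                · exact h'
        apply ih _ _ hInv' ?_ c hc
        have hlen := expandStep_len (n := n) (m := m) (stack := rest) hguard
        have hu := ucount_mset_lt (show Shp n m M from hInv.shp) hc0In hguard.2
        rw [hsnd]
        simp only [List.length_cons] at hf
        omega
      · have hskip := expandStep_skip (n := n) (m := m) (stack := rest) hguard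
        rw [show (expandStepB n m g c0 rest M).1 = rest from by rw [hskip],
          show (expandStepB n m g c0 rest M).2 = M from by rw [hskip]]
        apply ih _ _ ?inv ?meas c hc
        case inv =>
          refine ⟨hInv.shp, hInv.mono, hInv.sound, ?_, ?_, ?_⟩
          · intro d hd; exact hInv.stack d (List.mem_cons_of_mem _ hd)
          · intro x hx hm hacc d hAdj hOpd
            rcases hInv.front x hx hm hacc d hAdj hOpd with h | h
            · exact Or.inl h
            · by_cases hdc : d = c0
              · cases hM : mget false M d.1 d.2 with
                | true => exact Or.inl rfl
                | false => exact absurd (by rw [← hdc]; exact ⟨hOpd.2, hM⟩) hguard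
              · refine Or.inr ?_
                rcases List.mem_cons.mp h with h' | h'
                · exact absurd h' hdc
                · exact h'
          · intro s hsm hsOp
            rcases hInv.seedsP s hsm hsOp with h | h
            · exact Or.inl h
            · by_cases hsc : s = c0
              · cases hM : mget false M s.1 s.2 with
                | true => exact Or.inl rfl
                | false => exact absurd (by rw [← hsc]; exact ⟨hsOp.2, hM⟩) hguard
              · refine Or.inr ?_
                rcases List.mem_cons.mp h with h' | h'
                · exact absurd h' hsc
                · exact h'
        case meas =>
          simp only [List.length_cons] at hf
          omega

theorem expandCall_char {n m : Int} {g : List (List Char)} {acc0 : List (List Bool)}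
    {seeds : List (Int × Int)} (hacc : Shp n m acc0)
    (hseeds : ∀ s ∈ seeds, InR n m s) :
    ∀ c, InR n m c →
      (mget false (expandCall n m g seeds acc0) c.1 c.2 = true ↔
        (mget false acc0 c.1 c.2 = true ∨ NR n m g acc0 seeds c)) := by
  intro c hc
  apply expandB_loop _ _ _ ?inv ?meas c hc
  case inv =>
    refine ⟨hacc, fun x _ _ h => h, fun x _ h => Or.inl h, ?_, ?_, ?_⟩
    · intro d hd
      have hmem := List.mem_reverse.mp hd
      exact ⟨hseeds d hmem, Or.inl hmem⟩
    · intro x _ hm hacc0 _ _ _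
      simp [hm] at hacc0
    · intro s hsm _
      exact Or.inr (List.mem_reverse.mpr hsm)
  case meas =>
    have := ucount_le n m acc0
    simp only [List.length_reverse]
    omega

theorem accNbr_of_adj {acc : List (List Bool)} {c b : Int × Int} (hAdj : Adj c b)
    (hm : mget false acc b.1 b.2 = true) : accNbrB acc c = true := by
  rcases hAdj with rfl | rfl | rfl | rfl <;> simp [accNbrB, hm]

theorem accNbr_elim {acc : List (List Bool)} {c : Int × Int} (h : accNbrB acc c = true) :
    ∃ e, Adj c e ∧ mget false acc e.1 e.2 = true := by
  simp only [accNbrB, Bool.or_eq_true] at h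
  rcases h with ((h | h) | h) | h
  · exact ⟨(c.1 - 1, c.2), Or.inl rfl, h⟩
  · exact ⟨(c.1 + 1, c.2), Or.inr (Or.inl rfl), h⟩
  · exact ⟨(c.1, c.2 - 1), Or.inr (Or.inr (Or.inl rfl)), h⟩
  · exact ⟨(c.1, c.2 + 1), Or.inr (Or.inr (Or.inr rfl)), h⟩

theorem adj_inR_of_interior {n m : Int} {s e : Int × Int}
    (h1 : 1 ≤ s.1) (h2 : s.1 ≤ n - 2) (h3 : 1 ≤ s.2) (h4 : s.2 ≤ m - 2)
    (hAdj : Adj s e) : InR n m e := by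
  rcases hAdj with rfl | rfl | rfl | rfl <;>
    exact ⟨by simp; omega, by simp; omega, by simp; omega, by simp; omega⟩

theorem reach_update {n m : Int} {g : List (List Char)} {acc : List (List Bool)}
    {D : List (Int × Int)} (hs : Shp n m g)
    (hDint : ∀ x ∈ D, 1 ≤ x.1 ∧ x.1 ≤ n - 2 ∧ 1 ≤ x.2 ∧ x.2 ≤ m - 2)
    (hchar : ∀ x, InR n m x → (mget false acc x.1 x.2 = true ↔ Reach n m g x)) :
    ∀ c, InR n m c →
      (Reach n m (zeroAll g D) c ↔
        (Reach n m g c ∨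
          NR n m (zeroAll g D) acc (D.filter (fun x => accNbrB acc x)) c)) := by
  have hD : ∀ x ∈ D, InR n m x := by
    intro x hx
    obtain ⟨a, b, c', e⟩ := hDint x hx
    exact ⟨by omega, by omega, by omega, by omega⟩
  have hOpMono : ∀ x, Op n m g x → Op n m (zeroAll g D) x := fun x h =>
    op_zeroAll_mono hD hs h
  have hStepMono : ∀ x y, StepR n m g x y → StepR n m (zeroAll g D) x y :=
    fun x y h => ⟨hOpMono _ h.1, hOpMono _ h.2.1, h.2.2⟩
  intro c hc
  constructor
  · rintro ⟨hOpc, hrtg⟩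
    have key : ∀ x, Relation.ReflTransGen (StepR n m (zeroAll g D)) (0,0) x →
        Op n m (zeroAll g D) x →
        (Reach n m g x ∨ NR n m (zeroAll g D) acc (D.filter (fun y => accNbrB acc y)) x) := by
      intro x hx
      induction hx with
      | refl =>
        intro hOp0
        left
        have h00 : ((0,0) : Int × Int) ∉ D := by
          intro hmem
          obtain ⟨a, _, _, _⟩ := hDint _ hmem
          simp at a
        refine ⟨⟨hOp0.1, ?_⟩, Relation.ReflTransGen.refl⟩
        rw [← mget_zeroAll_of_not_mem hD (le_refl 0) (le_refl 0) h00 hs]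
        exact hOp0.2
      | @tail b c' hab hbc ihx =>
        intro hOpc'
        have hInb : InR n m b := hbc.1.1
        have hInc : InR n m c' := hbc.2.1.1
        rcases ihx hbc.1 with hRb | hNRb
        · by_cases hOgc : mget '0' g c'.1 c'.2 = '0'
          · left
            have hOpgc : Op n m g c' := ⟨hInc, hOgc⟩
            exact ⟨hOpgc, hRb.2.tail ⟨hRb.1, hOpgc, hbc.2.2⟩⟩
          · right
            have hcD : c' ∈ D := by
              by_contra hnot
              rw [← mget_zeroAll_of_not_mem hD hInc.1 hInc.2.2.1 hnot hs] at hOgc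
              exact hOgc hbc.2.1.2
            have haccF : mget false acc c'.1 c'.2 = false := by
              cases hv : mget false acc c'.1 c'.2 with
              | false => rfl
              | true => exact absurd ((hchar c' hInc).mp hv).1.2 hOgc
            have hnbr : accNbrB acc c' = true :=
              accNbr_of_adj (adj_symm hbc.2.2) ((hchar b hInb).mpr hRb)
            refine ⟨c', List.mem_filter.mpr ⟨hcD, by simp [hnbr]⟩,
              ⟨hbc.2.1, haccF⟩, Relation.ReflTransGen.refl⟩
        · by_cases hvacc : mget false acc c'.1 c'.2 = true
          · exact Or.inl ((hchar c' hInc).mp hvacc)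
          · right
            have hOpNb := nr_opN hNRb
            obtain ⟨s, hsm, hsOp, hsrtg⟩ := hNRb
            exact ⟨s, hsm, hsOp, hsrtg.tail ⟨hOpNb, ⟨hbc.2.1, by
              cases hv : mget false acc c'.1 c'.2 with
              | false => rfl
              | true => exact absurd hv hvacc⟩, hbc.2.2⟩⟩
    exact key c hrtg hOpc
  · rintro (hR | hNR)
    · exact ⟨hOpMono _ hR.1, Relation.ReflTransGen.mono hStepMono hR.2⟩
    · obtain ⟨s, hsm, hsOpN, hsrtg⟩ := hNR
      obtain ⟨hsD, hsnbr⟩ := List.mem_filter.mp hsm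
      obtain ⟨e, hAdj, hacce⟩ := accNbr_elim (by simpa using hsnbr)
      obtain ⟨h1, h2, h3, h4⟩ := hDint s hsD
      have hIne : InR n m e := adj_inR_of_interior h1 h2 h3 h4 hAdj
      have hRe : Reach n m g e := (hchar e hIne).mp hacce
      have hRe' : Reach n m (zeroAll g D) e :=
        ⟨hOpMono _ hRe.1, Relation.ReflTransGen.mono hStepMono hRe.2⟩
      have hOps' : Op n m (zeroAll g D) s := hsOpN.1
      have hrtg0s : Relation.ReflTransGen (StepR n m (zeroAll g D)) (0,0) s :=
        hRe'.2.tail ⟨hRe'.1, hOps', adj_symm hAdj⟩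
      have hOpc' : Op n m (zeroAll g D) c := (rtg_last (fun a b hab => hab.2.1) hsrtg hsOpN).1
      have hsc : Relation.ReflTransGen (StepR n m (zeroAll g D)) s c :=
        Relation.ReflTransGen.mono (fun x y h => ⟨h.1.1, h.2.1.1, h.2.2⟩) hsrtg
      exact ⟨hOpc', hrtg0s.trans hsc⟩

-- ---------- the removal scan as filter + zeroAll ----------
abbrev scanP (t : Char) (a : Bool) (can : List (List Bool)) (arr : List (List Char))
    (c : Int × Int) : Prop :=
  mget '0' arr c.1 c.2 = t ∧
    (a = true → nearsA.any (fun near => mget false can (c.1 + near.1) (c.2 + near.2)) = true)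

theorem mem_interiorB {n m : Int} {c : Int × Int} :
    c ∈ interiorB n m ↔ 1 ≤ c.1 ∧ c.1 ≤ n - 2 ∧ 1 ≤ c.2 ∧ c.2 ≤ m - 2 := by
  obtain ⟨i, j⟩ := c
  rw [show interiorB n m = PySem.List.pyRange 1 (n-1) 1 ×ˢ PySem.List.pyRange 1 (m-1) 1 from rfl,
    List.mem_product, PySem.List.mem_pyRange_one, PySem.List.mem_pyRange_one]
  omega

theorem nodup_interiorB (n m : Int) : (interiorB n m).Nodup := by
  rw [show interiorB n m = PySem.List.pyRange 1 (n-1) 1 ×ˢ PySem.List.pyRange 1 (m-1) 1 from rfl]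
  exact (PySem.List.nodup_pyRange_one _ _).product (PySem.List.nodup_pyRange_one _ _)

theorem inR_of_mem_interiorB {n m : Int} {c : Int × Int} (h : c ∈ interiorB n m) :
    InR n m c := by
  obtain ⟨a, b, c', e⟩ := mem_interiorB.mp h
  exact ⟨by omega, by omega, by omega, by omega⟩

theorem scanP_congr {n m : Int} {t : Char} {a : Bool} {can : List (List Bool)}
    {arr : List (List Char)} (hs : Shp n m arr) {c x : Int × Int}
    (hc : InR n m c) (hx : InR n m x) (hne : x ≠ c) :
    scanP t a can (mset arr c.1 c.2 '0') x ↔ scanP t a can arr x := by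
  unfold scanP
  have hne' : (c.1, c.2) ≠ (x.1, x.2) := by
    intro hcon; apply hne
    obtain ⟨u,v⟩ := c; obtain ⟨p,q⟩ := x
    simp only [Prod.ext_iff] at hcon ⊢
    exact ⟨hcon.1.symm, hcon.2.symm⟩
  rw [mget_mset_ne hs hc hx.1 hx.2.2.1 hne' '0' '0']

theorem scan_fold {n m : Int} (t : Char) (a : Bool) (can : List (List Bool)) :
    ∀ (cells : List (Int × Int)), cells.Nodup → (∀ c ∈ cells, InR n m c) →
    ∀ (arr : List (List Char)) (k : Int), Shp n m arr →
    cells.foldl (fun (st : Int × List (List Char)) (c : Int × Int) =>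
        if mget '0' st.2 c.1 c.2 = t then
          if a = true then
            if nearsA.any (fun near => mget false can (c.1 + near.1) (c.2 + near.2)) then
              (st.1 + 1, mset st.2 c.1 c.2 '0')
            else st
          else (st.1 + 1, mset st.2 c.1 c.2 '0')
        else st) (k, arr)
      = (k + ((cells.filter (fun c => decide (scanP t a can arr c))).length : Int),
         zeroAll arr (cells.filter (fun c => decide (scanP t a can arr c)))) := by
  intro cells
  induction cells with
  | nil =>
    intro _ _ arr k _
    simp [zeroAll]
  | cons c cs ih =>
    intro hnd hIn arr k hs
    have hcIn := hIn c List.mem_cons_self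
    have hnd' := hnd.of_cons
    have hcni : c ∉ cs := (List.nodup_cons.mp hnd).1
    have hIn' : ∀ x ∈ cs, InR n m x := fun x hx => hIn x (List.mem_cons_of_mem _ hx)
    simp only [List.foldl_cons]
    by_cases hP : scanP t a can arr c
    · have hstep : (if mget '0' arr c.1 c.2 = t then
          if a = true then
            if nearsA.any (fun near => mget false can (c.1 + near.1) (c.2 + near.2)) then
              ((k : Int) + 1, mset arr c.1 c.2 '0')
            else (k, arr)
          else (k + 1, mset arr c.1 c.2 '0')
        else (k, arr)) = (k + 1, mset arr c.1 c.2 '0') := by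
        obtain ⟨h1, h2⟩ := hP
        rw [if_pos h1]
        by_cases ha : a = true
        · rw [if_pos ha, if_pos (h2 ha)]
        · rw [if_neg ha]
      rw [hstep, ih hnd' hIn' (mset arr c.1 c.2 '0') (k+1) (shp_mset hs hcIn '0')]
      have hfc : cs.filter (fun x => decide (scanP t a can (mset arr c.1 c.2 '0') x)) =
          cs.filter (fun x => decide (scanP t a can arr x)) := by
        apply List.filter_congr
        intro x hx
        simp only [decide_eq_decide]
        exact scanP_congr hs hcIn (hIn' x hx) (fun h => hcni (h ▸ hx))
      rw [hfc]
      have hfilter : (c :: cs).filter (fun x => decide (scanP t a can arr x)) =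
          c :: cs.filter (fun x => decide (scanP t a can arr x)) := by
        rw [List.filter_cons, if_pos (decide_eq_true hP)]
      rw [hfilter]
      simp only [Prod.mk.injEq]
      refine ⟨?_, rfl⟩
      simp only [List.length_cons]
      push_cast
      ring
    · have hstep : (if mget '0' arr c.1 c.2 = t then
          if a = true then
            if nearsA.any (fun near => mget false can (c.1 + near.1) (c.2 + near.2)) then
              ((k : Int) + 1, mset arr c.1 c.2 '0')
            else (k, arr)
          else (k + 1, mset arr c.1 c.2 '0')
        else (k, arr)) = (k, arr) := by
        unfold scanP at hP
        by_cases h1 : mget '0' arr c.1 c.2 = t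
        · rw [if_pos h1]
          by_cases ha : a = true
          · rw [if_pos ha, if_neg (by
              intro hany
              exact hP ⟨h1, fun _ => hany⟩)]
          · exact absurd ⟨h1, fun h => absurd h ha⟩ hP
        · rw [if_neg h1]
      rw [hstep, ih hnd' hIn' arr k hs]
      have hfilter : (c :: cs).filter (fun x => decide (scanP t a can arr x)) =
          cs.filter (fun x => decide (scanP t a can arr x)) := by
        rw [List.filter_cons, if_neg (fun hcon => hP (of_decide_eq_true hcon))]
      rw [hfilter]

-- ---------- removeA as a pure filter ----------
theorem removeA_char {n m : Int} {arr : List (List Char)} (t : Char) (a : Bool)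
    (hs : Shp n m arr) :
    removeA n m arr t a =
      (0 + (((interiorB n m).filter
          (fun c => decide (scanP t a (getAccessA n m arr) arr c))).length : Int),
        zeroAll arr ((interiorB n m).filter
          (fun c => decide (scanP t a (getAccessA n m arr) arr c)))) := by
  have h := scan_fold (n := n) (m := m) t a (getAccessA n m arr) (interiorB n m)
    (nodup_interiorB n m) (fun c hc => inR_of_mem_interiorB hc) arr 0 hs
  rw [show interiorB n m =
    (PySem.List.pyRange 1 (n-1) 1).flatMap (fun i =>
      (PySem.List.pyRange 1 (m-1) 1).map (fun j => (i, j))) from rfl,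
    List.foldl_flatMap] at h
  simp only [List.foldl_map] at h
  exact h

-- ---------- shape preservation (unconditional) ----------
theorem shp_mset' {α : Type} {n m : Int} {g : List (List α)} (h : Shp n m g)
    (i j : Int) (v : α) : Shp n m (mset g i j v) := by
  refine ⟨by simpa [mset] using h.1, ?_⟩
  intro r hr
  obtain ⟨k, hk, hrk⟩ := List.mem_iff_getElem.mp hr
  subst hrk
  simp only [mset] at hk ⊢
  by_cases hki : k = i.toNat
  · subst hki
    rw [List.getElem_set_self hk, List.length_set]
    have hkg : i.toNat < g.length := by simpa using hk
    rw [List.getD_eq_getElem _ _ hkg]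
    exact h.2 _ (List.getElem_mem _)
  · rw [List.getElem_set_ne (fun hne => hki hne.symm)]
    exact h.2 _ (List.getElem_mem _)

theorem expandB_shp {n m : Int} {g : List (List Char)} :
    ∀ (f : Nat) (stack : List (Int × Int)) (M : List (List Bool)),
    Shp n m M → Shp n m (expandB n m g f stack M) := by
  intro f
  induction f with
  | zero => intro _ M h; exact h
  | succ f ih =>
    intro stack M h
    cases stack with
    | nil => exact h
    | cons c0 rest =>
      rw [show expandB n m g (f+1) (c0::rest) M =
        expandB n m g f (expandStepB n m g c0 rest M).1 (expandStepB n m g c0 rest M).2 from rfl]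
      apply ih
      by_cases hguard : mget '0' g c0.1 c0.2 = '0' ∧ mget false M c0.1 c0.2 = false
      · rw [expandStep_snd_mark (n := n) (m := m) hguard]
        exact shp_mset' h c0.1 c0.2 true
      · rw [show (expandStepB n m g c0 rest M).2 = M from by
          rw [expandStep_skip (n := n) (m := m) hguard]]
        exact h

theorem expandCall_shp {n m : Int} {g : List (List Char)} {seeds : List (Int × Int)}
    {acc : List (List Bool)} (h : Shp n m acc) :
    Shp n m (expandCall n m g seeds acc) :=
  expandB_shp _ _ _ h

-- ---------- facts about the bordered grid both ports build ----------
theorem foldl_mset_preserve {γ : Type} {n m : Int} (pos : γ → Int × Int) (v : γ → Char) :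
    ∀ (l : List γ), (∀ x ∈ l, InR n m (pos x) ∧ pos x ≠ (0,0)) →
    ∀ g, Shp n m g → mget '0' g 0 0 = '0' →
    Shp n m (l.foldl (fun g x => mset g (pos x).1 (pos x).2 (v x)) g) ∧
    mget '0' (l.foldl (fun g x => mset g (pos x).1 (pos x).2 (v x)) g) 0 0 = '0' := by
  intro l
  induction l with
  | nil => intro _ g hs hb; exact ⟨hs, hb⟩
  | cons x xs ih =>
    intro hl g hs hb
    obtain ⟨hIn, hne⟩ := hl x List.mem_cons_self
    simp only [List.foldl_cons]
    apply ih (fun y hy => hl y (List.mem_cons_of_mem _ hy))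
    · exact shp_mset' hs _ _ _
    · have hne' : ((pos x).1, (pos x).2) ≠ ((0 : Int), (0 : Int)) := by
        intro hcon; apply hne
        have h1 := congrArg Prod.fst hcon
        have h2 := congrArg Prod.snd hcon
        simp only at h1 h2
        exact Prod.ext_iff.mpr ⟨h1, h2⟩
      exact (mget_mset_ne hs hIn (le_refl 0) (le_refl 0) hne' '0' _).trans hb

theorem pvBuild_facts (storage : List String) {n m : Int} (h2n : 2 ≤ n) (h2m : 2 ≤ m) :
    Shp n m (pvBuild storage n m) ∧ mget '0' (pvBuild storage n m) 0 0 = '0' := by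
  unfold pvBuild
  have houter : ∀ (li : List Int), (∀ i ∈ li, 0 ≤ i ∧ i + 1 < n) →
      ∀ g, Shp n m g → mget '0' g 0 0 = '0' →
      Shp n m (li.foldl (fun a i => (PySem.List.pyRange 0 (m-2) 1).foldl
        (fun a j => mset a (i+1) (j+1)
          ((PySem.Str.pyGet? (storage.getD i.toNat "") j).getD '0')) a) g) ∧
      mget '0' (li.foldl (fun a i => (PySem.List.pyRange 0 (m-2) 1).foldl
        (fun a j => mset a (i+1) (j+1)
          ((PySem.Str.pyGet? (storage.getD i.toNat "") j).getD '0')) a) g) 0 0 = '0' := by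
    intro li
    induction li with
    | nil => intro _ g hs hb; exact ⟨hs, hb⟩
    | cons i is ih =>
      intro hl g hs hb
      obtain ⟨hi0, hi1⟩ := hl i List.mem_cons_self
      simp only [List.foldl_cons]
      apply ih (fun y hy => hl y (List.mem_cons_of_mem _ hy))
      all_goals {
        have hrow := foldl_mset_preserve (n := n) (m := m)
          (fun j : Int => (i + 1, j + 1))
          (fun j : Int => (PySem.Str.pyGet? (storage.getD i.toNat "") j).getD '0')
          (PySem.List.pyRange 0 (m-2) 1)
          (by
            intro j hj
            rw [PySem.List.mem_pyRange_one] at hj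
            constructor
            · exact ⟨by simp; omega, by simp; omega, by simp; omega, by simp; omega⟩
            · intro hcon
              have := congrArg Prod.fst hcon
              simp at this
              omega)
          g hs hb
        first
        | exact hrow.1
        | exact hrow.2
      }
  apply houter
  · intro i hi
    rw [PySem.List.mem_pyRange_one] at hi
    omega
  · exact shp_replicate n m '0'
  · exact mget_replicate ⟨le_refl 0, by omega, le_refl 0, by omega⟩ '0' '0'

-- ---------- assembling the per-request step ----------
theorem beq_of_iff {x y : Bool} (h : x = true ↔ y = true) : x = y := by
  cases x <;> cases y <;> simp_all

theorem any_nears_eq_accNbr (can : List (List Bool)) (c : Int × Int) :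
    (nearsA.any fun near => mget false can (c.1 + near.1) (c.2 + near.2)) = accNbrB can c := by
  have e1 : c.1 + -1 = c.1 - 1 := by ring
  have e2 : c.2 + -1 = c.2 - 1 := by ring
  simp [nearsA, accNbrB, e1, e2, Bool.or_assoc]

def MainInv (n m : Int) (sa : Int × List (List Char))
    (sb : Int × List (List Char) × List (List Bool)) : Prop :=
  sa.1 = sb.1 ∧ sa.2 = sb.2.1 ∧ Shp n m sa.2 ∧ Shp n m sb.2.2 ∧
  mget '0' sa.2 0 0 = '0' ∧
  (∀ c, InR n m c → (mget false sb.2.2 c.1 c.2 = true ↔ Reach n m sa.2 c))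

theorem step_preserve {n m : Int} (h2n : 2 ≤ n) (h2m : 2 ≤ m) (request : String)
    (sa : Int × List (List Char)) (sb : Int × List (List Char) × List (List Bool))
    (h : MainInv n m sa sb) :
    MainInv n m
      (sa.1 - (removeA n m sa.2 ((PySem.Str.pyGet? request 0).getD '0')
          (if PySem.Str.len request = 1 then true else false)).1,
        (removeA n m sa.2 ((PySem.Str.pyGet? request 0).getD '0')
          (if PySem.Str.len request = 1 then true else false)).2)
      (sb.1 - (((interiorB n m).filter (fun c =>
            mget '0' sb.2.1 c.1 c.2 = (PySem.Str.pyGet? request 0).getD '0' ∧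
              (¬ PySem.Str.len request = 1 ∨ accNbrB sb.2.2 c = true))).length : Int),
        ((interiorB n m).filter (fun c =>
            mget '0' sb.2.1 c.1 c.2 = (PySem.Str.pyGet? request 0).getD '0' ∧
              (¬ PySem.Str.len request = 1 ∨ accNbrB sb.2.2 c = true))).foldl
          (fun g c => mset g c.1 c.2 '0') sb.2.1,
        expandCall n m
          (((interiorB n m).filter (fun c =>
              mget '0' sb.2.1 c.1 c.2 = (PySem.Str.pyGet? request 0).getD '0' ∧
                (¬ PySem.Str.len request = 1 ∨ accNbrB sb.2.2 c = true))).foldl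
            (fun g c => mset g c.1 c.2 '0') sb.2.1)
          (((interiorB n m).filter (fun c =>
              mget '0' sb.2.1 c.1 c.2 = (PySem.Str.pyGet? request 0).getD '0' ∧
                (¬ PySem.Str.len request = 1 ∨ accNbrB sb.2.2 c = true))).filter
            (fun c => accNbrB sb.2.2 c))
          sb.2.2) := by
  obtain ⟨h1, h2, hsA, hsAcc, hb, hchar⟩ := h
  have hn0 : 0 < n := by omega
  have hm0 : 0 < m := by omega
  set t : Char := (PySem.Str.pyGet? request 0).getD '0' with ht
  set a : Bool := (if PySem.Str.len request = 1 then true else false) with ha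
  have hana : a = true ↔ PySem.Str.len request = 1 := by
    rw [ha]; split <;> simp_all
  have hcan := getAccessA_char hsA hb hn0 hm0
  -- the two filters coincide
  have hfeq : (interiorB n m).filter
        (fun c => decide (scanP t a (getAccessA n m sa.2) sa.2 c)) =
      (interiorB n m).filter (fun c =>
        mget '0' sb.2.1 c.1 c.2 = t ∧ (¬ PySem.Str.len request = 1 ∨ accNbrB sb.2.2 c = true)) := by
    apply List.filter_congr
    intro c hcmem
    obtain ⟨hi1, hi2, hi3, hi4⟩ := mem_interiorB.mp hcmem
    have hnbr : accNbrB (getAccessA n m sa.2) c = accNbrB sb.2.2 c := by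
      have hpt : ∀ e : Int × Int, Adj c e →
          mget false (getAccessA n m sa.2) e.1 e.2 = mget false sb.2.2 e.1 e.2 := by
        intro e hAdj
        have hIe : InR n m e := adj_inR_of_interior hi1 hi2 hi3 hi4 hAdj
        exact beq_of_iff ((hcan e hIe).trans (hchar e hIe).symm)
      simp only [accNbrB]
      rw [hpt (c.1 - 1, c.2) (Or.inl rfl), hpt (c.1 + 1, c.2) (Or.inr (Or.inl rfl)),
        hpt (c.1, c.2 - 1) (Or.inr (Or.inr (Or.inl rfl))),
        hpt (c.1, c.2 + 1) (Or.inr (Or.inr (Or.inr rfl)))]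
    simp only [decide_eq_decide]
    unfold scanP
    rw [any_nears_eq_accNbr, hnbr, ← h2]
    constructor
    · rintro ⟨hv, himp⟩
      refine ⟨hv, ?_⟩
      by_cases hna : PySem.Str.len request = 1
      · exact Or.inr (himp (hana.mpr hna))
      · exact Or.inl hna
    · rintro ⟨hv, hor⟩
      refine ⟨hv, ?_⟩
      intro haT
      rcases hor with hna | hx
      · exact absurd (hana.mp haT) hna
      · exact hx
  have hrem := removeA_char (n := n) (m := m) t a hsA
  set L := (interiorB n m).filter (fun c =>
    mget '0' sb.2.1 c.1 c.2 = t ∧ (¬ PySem.Str.len request = 1 ∨ accNbrB sb.2.2 c = true)) with hL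
  rw [hfeq] at hrem
  have hLsub : ∀ x ∈ L, 1 ≤ x.1 ∧ x.1 ≤ n - 2 ∧ 1 ≤ x.2 ∧ x.2 ≤ m - 2 := by
    intro x hx
    exact mem_interiorB.mp (List.mem_of_mem_filter hx)
  have hLIn : ∀ x ∈ L, InR n m x := by
    intro x hx
    obtain ⟨a1, a2, a3, a4⟩ := hLsub x hx
    exact ⟨by omega, by omega, by omega, by omega⟩
  have hz : (removeA n m sa.2 t a).2 = zeroAll sa.2 L := by rw [hrem]
  have hcnt : (removeA n m sa.2 t a).1 = (L.length : Int) := by rw [hrem]; simp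
  have hgrid' : L.foldl (fun g c => mset g c.1 c.2 '0') sb.2.1 = zeroAll sa.2 L := by
    rw [← h2]; rfl
  refine ⟨?_, ?_, ?_, ?_, ?_, ?_⟩
  · simp only [hcnt, h1]
  · simp only [hz, hgrid']
  · simp only [hz]
    exact shp_zeroAll hLIn hsA
  · exact expandCall_shp hsAcc
  · simp only [hz]
    have hnm : ((0,0) : Int × Int) ∉ L := by
      intro hmem
      obtain ⟨a1, _, _, _⟩ := hLsub _ hmem
      simp at a1
    exact (mget_zeroAll_of_not_mem (c := ((0 : Int), (0 : Int))) hLIn (le_refl 0)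
      (le_refl 0) hnm hsA).trans hb
  · intro c hc
    simp only [hz]
    rw [hgrid']
    have hseedsIn : ∀ s ∈ L.filter (fun c => accNbrB sb.2.2 c), InR n m s := by
      intro s hs
      exact hLIn s (List.mem_of_mem_filter hs)
    rw [expandCall_char hsAcc hseedsIn c hc]
    have hru := reach_update (acc := sb.2.2) (D := L) hsA hLsub hchar c hc
    rw [hru]
    constructor
    · rintro (hm | hnr)
      · exact Or.inl ((hchar c hc).mp hm)
      · exact Or.inr hnr
    · rintro (hm | hnr)
      · exact Or.inl ((hchar c hc).mpr hm)
      · exact Or.inr hnr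

theorem main_fold {n m : Int} (h2n : 2 ≤ n) (h2m : 2 ≤ m) :
    ∀ (reqs : List String) (sa : Int × List (List Char))
      (sb : Int × List (List Char) × List (List Bool)), MainInv n m sa sb →
    MainInv n m
      (reqs.foldl (fun (st : Int × List (List Char)) request =>
        let res := removeA n m st.2 ((PySem.Str.pyGet? request 0).getD '0')
          (if PySem.Str.len request = 1 then true else false)
        (st.1 - res.1, res.2)) sa)
      (reqs.foldl (fun (st : Int × List (List Char) × List (List Bool)) request =>
        let target := (PySem.Str.pyGet? request 0).getD '0'
        let needAccess := PySem.Str.len request = 1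
        let grid := st.2.1
        let acc := st.2.2
        let removed := (interiorB n m).filter (fun c =>
          mget '0' grid c.1 c.2 = target ∧ (¬ needAccess ∨ accNbrB acc c = true))
        let grid' := removed.foldl (fun g c => mset g c.1 c.2 '0') grid
        let acc' := expandCall n m grid' (removed.filter (fun c => accNbrB acc c)) acc
        (st.1 - removed.length, grid', acc')) sb) := by
  intro reqs
  induction reqs with
  | nil => intro sa sb h; exact h
  | cons r rs ih =>
    intro sa sb h
    simp only [List.foldl_cons]
    exact ih _ _ (step_preserve h2n h2m r sa sb h)

theorem init_char (storage : List String) {n m : Int} (h2n : 2 ≤ n) (h2m : 2 ≤ m)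
    (hbB : mget '0' (pvBuild storage n m) 0 0 = '0') :
    ∀ c, InR n m c →
      (mget false (expandCall n m (pvBuild storage n m) [(0,0)]
          (List.replicate n.toNat (List.replicate m.toNat false))) c.1 c.2 = true ↔
        Reach n m (pvBuild storage n m) c) := by
  intro c hc
  have h00 : InR n m ((0,0) : Int × Int) := ⟨le_refl 0, by omega, le_refl 0, by omega⟩
  rw [expandCall_char (shp_replicate n m false)
    (by intro s hs; rcases List.mem_singleton.mp hs with rfl; exact h00) c hc]
  rw [mget_replicate hc false false]
  constructor
  · rintro (hfalse | hnr)
    · cases hfalse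
    · obtain ⟨s, hs, hOpN, hrtg⟩ := hnr
      rcases List.mem_singleton.mp hs with rfl
      have hOpc := (rtg_last (fun a b hab => hab.2.1) hrtg hOpN).1
      exact ⟨hOpc, Relation.ReflTransGen.mono
        (fun x y hxy => ⟨hxy.1.1, hxy.2.1.1, hxy.2.2⟩) hrtg⟩
  · rintro ⟨hOpc, hrtg⟩
    right
    have hOp0 : Op n m (pvBuild storage n m) (0,0) := ⟨h00, hbB⟩
    refine ⟨(0,0), by simp, ⟨hOp0, mget_replicate h00 false false⟩, ?_⟩
    exact Relation.ReflTransGen.mono (fun x y hxy =>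
      ⟨⟨hxy.1, mget_replicate hxy.1.1 false false⟩,
        ⟨hxy.2.1, mget_replicate hxy.2.1.1 false false⟩, hxy.2.2⟩) hrtg

-- ===== VERDICT (by name: the statement is the Claim_ definition above) =====
set_option maxHeartbeats 2000000 in
theorem solution_spec : Claim_equal_solution := by
  intro storage requests _hdom _hpre
  unfold Spec_solution
  have h2n : 2 ≤ PySem.List.len storage + 2 := by
    simp only [PySem.List.len_eq]; omega
  have h2m : 2 ≤ PySem.Str.len ((PySem.List.pyGet? storage 0).getD "") + 2 := by
    simp only [PySem.Str.len_eq]; omega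
  obtain ⟨hshpB, hbB⟩ := pvBuild_facts storage h2n h2m
  have eA : solution storage requests =
      (requests.foldl (fun (st : Int × List (List Char)) request =>
        let res := removeA (PySem.List.len storage + 2)
          (PySem.Str.len ((PySem.List.pyGet? storage 0).getD "") + 2) st.2
          ((PySem.Str.pyGet? request 0).getD '0')
          (if PySem.Str.len request = 1 then true else false)
        (st.1 - res.1, res.2))
        ((PySem.List.len storage + 2 - 2) * (PySem.Str.len ((PySem.List.pyGet? storage 0).getD "") + 2 - 2),
          pvBuild storage (PySem.List.len storage + 2)
            (PySem.Str.len ((PySem.List.pyGet? storage 0).getD "") + 2))).1 := rfl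
  have eB : solution_alt storage requests =
      (requests.foldl (fun (st : Int × List (List Char) × List (List Bool)) request =>
        let target := (PySem.Str.pyGet? request 0).getD '0'
        let needAccess := PySem.Str.len request = 1
        let grid := st.2.1
        let acc := st.2.2
        let removed := (interiorB (PySem.List.len storage + 2)
          (PySem.Str.len ((PySem.List.pyGet? storage 0).getD "") + 2)).filter (fun c =>
          mget '0' grid c.1 c.2 = target ∧ (¬ needAccess ∨ accNbrB acc c = true))
        let grid' := removed.foldl (fun g c => mset g c.1 c.2 '0') grid
        let acc' := expandCall (PySem.List.len storage + 2)
          (PySem.Str.len ((PySem.List.pyGet? storage 0).getD "") + 2) grid'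
          (removed.filter (fun c => accNbrB acc c)) acc
        (st.1 - removed.length, grid', acc'))
        ((PySem.List.len storage + 2 - 2) * (PySem.Str.len ((PySem.List.pyGet? storage 0).getD "") + 2 - 2),
          pvBuild storage (PySem.List.len storage + 2)
            (PySem.Str.len ((PySem.List.pyGet? storage 0).getD "") + 2),
          expandCall (PySem.List.len storage + 2)
            (PySem.Str.len ((PySem.List.pyGet? storage 0).getD "") + 2)
            (pvBuild storage (PySem.List.len storage + 2)
              (PySem.Str.len ((PySem.List.pyGet? storage 0).getD "") + 2))
            [(0, 0)]
            (List.replicate (PySem.List.len storage + 2).toNat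
              (List.replicate (PySem.Str.len ((PySem.List.pyGet? storage 0).getD "") + 2).toNat false)))).1 := rfl
  rw [eA, eB]
  have hinv0 : MainInv (PySem.List.len storage + 2)
      (PySem.Str.len ((PySem.List.pyGet? storage 0).getD "") + 2)
      ((PySem.List.len storage + 2 - 2) * (PySem.Str.len ((PySem.List.pyGet? storage 0).getD "") + 2 - 2),
        pvBuild storage (PySem.List.len storage + 2)
          (PySem.Str.len ((PySem.List.pyGet? storage 0).getD "") + 2))
      ((PySem.List.len storage + 2 - 2) * (PySem.Str.len ((PySem.List.pyGet? storage 0).getD "") + 2 - 2),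
        pvBuild storage (PySem.List.len storage + 2)
          (PySem.Str.len ((PySem.List.pyGet? storage 0).getD "") + 2),
        expandCall (PySem.List.len storage + 2)
          (PySem.Str.len ((PySem.List.pyGet? storage 0).getD "") + 2)
          (pvBuild storage (PySem.List.len storage + 2)
            (PySem.Str.len ((PySem.List.pyGet? storage 0).getD "") + 2))
          [(0, 0)]
          (List.replicate (PySem.List.len storage + 2).toNat
            (List.replicate (PySem.Str.len ((PySem.List.pyGet? storage 0).getD "") + 2).toNat false))) :=
    ⟨rfl, rfl, hshpB, expandCall_shp (shp_replicate _ _ false), hbB,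
      init_char storage h2n h2m hbB⟩
  exact (main_fold h2n h2m requests _ _ hinv0).1
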